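-- pv_equiv track=rewrite | github.com/malikinss/PyGen | PyGen for Advanced/10_dictionaries/10_3_methods/10_3_7_correct_identifiers/10_3_7_correct_identifiers.py | correct_identifiers
-- ===== SOURCE A (Python) =====
-- def correct_identifiers(input_string: str) -> str:
--     """
--     Corrects a string of identifiers by ensuring no duplicates exist.
--     Appends a postfix `_n` to repeating identifiers, where `n` is the
--     occurrence count minus one.
--
--     Args:
--         input_string (str): A space-separated string of identifiers.
--
--     Returns:
--         str: A space-separated string of corrected identifiers.
--     """
--     # Convert to lowercase and split identifiers
--     identifiers = input_string.lower().split()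
--     count: dict = {}
--     corrected_ids = []
--
--     for identifier in identifiers:
--         # Update the count of the identifier
--         count[identifier] = count.get(identifier, 0) + 1
--
--         # Append the identifier with a suffix if it's a duplicate
--         if count[identifier] > 1:
--             corrected_ids.append(f"{identifier}_{count[identifier] - 1}")
--         else:
--             corrected_ids.append(identifier)
--
--     # Return the corrected identifiers as a single string
--     return " ".join(corrected_ids)
-- ===== SOURCE B (Python) =====
-- def correct_identifiers(input_string: str) -> str:
--     """Group-then-scatter: collect every identifier's list of positions,
--     then fill a preallocated output array group by group, suffixing the
--     k-th occurrence (k > 0) of each identifier with _k."""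
--     ids = input_string.lower().split()
--     groups = {}
--     for i, x in enumerate(ids):
--         groups.setdefault(x, []).append(i)
--     out = [""] * len(ids)
--     for x, positions in groups.items():
--         for k, i in enumerate(positions):
--             out[i] = x if k == 0 else f"{x}_{k}"
--     return " ".join(out)
-- ===== Notes on version B (the rewrite author's own statement) =====
-- stated objective: alternative
-- what changed: Replaced A's single forward pass with a running count dict by a group-then-scatter algorithm: first build a dict mapping each identifier to the list of its positions, then fill a preallocated output array group by group, writing the k-th occurrence with suffix _k by its rank in the group.
import Mathlib
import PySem

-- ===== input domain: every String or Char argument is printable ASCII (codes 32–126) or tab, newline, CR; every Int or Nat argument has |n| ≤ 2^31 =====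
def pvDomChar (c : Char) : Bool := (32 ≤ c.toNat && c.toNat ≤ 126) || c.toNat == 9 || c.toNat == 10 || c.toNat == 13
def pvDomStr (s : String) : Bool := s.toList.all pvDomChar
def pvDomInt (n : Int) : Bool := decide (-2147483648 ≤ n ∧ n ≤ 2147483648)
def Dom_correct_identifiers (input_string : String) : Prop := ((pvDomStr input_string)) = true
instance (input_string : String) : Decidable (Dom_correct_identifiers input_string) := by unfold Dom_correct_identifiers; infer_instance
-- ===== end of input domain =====

-- B replaces A's single counting pass by group-then-scatter: a dict of each
-- identifier's positions, then a scatter pass filling a preallocated output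
-- array group by group; alternative decomposition, not claimed faster.

-- ===== PORT A =====
def correct_identifiers (input_string : String) : String :=
  let identifiers := PySem.Str.split₀ (PySem.Str.lower input_string)
  let st := identifiers.foldl
    (fun (st : PySem.Dict String Int × List String) identifier =>
      let count := st.1.insert identifier (st.1.getD identifier 0 + 1)
      -- count[identifier]: the key was just inserted, so getD with default 0 is exact
      let c := count.getD identifier 0
      if c > 1 then (count, st.2 ++ [identifier ++ "_" ++ PySem.Int.toStr (c - 1)])
      else (count, st.2 ++ [identifier]))
    (PySem.Dict.empty, [])
  PySem.Str.join " " st.2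

-- ===== PORT B =====
def correct_identifiers_alt (input_string : String) : String :=
  let ids := PySem.Str.split₀ (PySem.Str.lower input_string)
  -- groups.setdefault(x, []).append(i) makes groups[x] = groups.get(x, []) + [i]
  -- (key appended when new): exactly Dict.modify
  let groups := (PySem.List.enumerate ids).foldl
    (fun (g : PySem.Dict String (List Int)) p => g.modify p.2 [] (· ++ [p.1]))
    PySem.Dict.empty
  -- out[i] = …: indices come from enumerate, always in range, where pySetD is exact
  let out := groups.items.foldl
    (fun out e =>
      (PySem.List.enumerate e.2).foldl
        (fun out q =>
          PySem.List.pySetD out q.2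
            (if q.1 == 0 then e.1 else e.1 ++ "_" ++ PySem.Int.toStr q.1))
        out)
    (List.replicate ids.length "")
  PySem.Str.join " " out

-- ===== PRECONDITION & SPEC =====
def Spec_correct_identifiers (input_string : String) (out : String) : Prop := out = correct_identifiers_alt input_string
instance (input_string : String) (out : String) : Decidable (Spec_correct_identifiers input_string out) := by unfold Spec_correct_identifiers; infer_instance

-- ===== CLAIM (what is proved, stated in full; the proofs are below) =====
def Claim_equal_correct_identifiers : Prop := ∀ (input_string : String), Dom_correct_identifiers input_string → Spec_correct_identifiers input_string (correct_identifiers input_string)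

-- ===== LEMMAS AND PROOFS =====

/-- The corrected identifier for one position: `n` prior occurrences. -/
def mkId (n : Int) (x : String) : String :=
  if n > 0 then x ++ "_" ++ PySem.Int.toStr n else x

/-- Reference list of corrected identifiers, threading the seen prefix. -/
def specParts (seen : List String) : List String → List String
  | [] => []
  | x :: xs => mkId (seen.count x : Int) x :: specParts (seen ++ [x]) xs

/-- Positions (as Python ints, offset s) at which `x` occurs in `l`. -/
def posAux (s : Int) (l : List String) (x : String) : List Int :=
  ((PySem.List.enumerate l s).filter (fun p => p.2 == x)).map (·.1)

lemma counter_snoc (seen : List String) (x : String) :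
    PySem.Dict.counter (seen ++ [x])
      = (PySem.Dict.counter seen).insert x ((PySem.Dict.counter seen).getD x 0 + 1) := by
  rw [← PySem.Dict.foldl_insert_getD_add_one_eq_counter,
      ← PySem.Dict.foldl_insert_getD_add_one_eq_counter, List.foldl_append]
  rfl

lemma A_loop (xs : List String) : ∀ (seen acc : List String),
    (xs.foldl
      (fun (st : PySem.Dict String Int × List String) identifier =>
        let count := st.1.insert identifier (st.1.getD identifier 0 + 1)
        let c := count.getD identifier 0
        if c > 1 then (count, st.2 ++ [identifier ++ "_" ++ PySem.Int.toStr (c - 1)])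
        else (count, st.2 ++ [identifier]))
      (PySem.Dict.counter seen, acc)).2 = acc ++ specParts seen xs := by
  induction xs with
  | nil => intro seen acc; simp [specParts]
  | cons x xs ih =>
    intro seen acc
    have hc : (PySem.Dict.counter seen).insert x ((seen.count x : Int) + 1)
        = PySem.Dict.counter (seen ++ [x]) := by
      rw [counter_snoc]; simp [PySem.Dict.getD_counter]
    have hstep : (fun (st : PySem.Dict String Int × List String) identifier =>
        let count := st.1.insert identifier (st.1.getD identifier 0 + 1)
        let c := count.getD identifier 0
        if c > 1 then (count, st.2 ++ [identifier ++ "_" ++ PySem.Int.toStr (c - 1)])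
        else (count, st.2 ++ [identifier])) (PySem.Dict.counter seen, acc) x
        = (PySem.Dict.counter (seen ++ [x]), acc ++ [mkId (seen.count x : Int) x]) := by
      simp only [PySem.Dict.getD_counter, hc, mkId]
      have hx : (List.count x (seen ++ [x]) : Int) = (List.count x seen : Int) + 1 := by
        simp [List.count_append]
      rw [hx]
      by_cases h : (seen.count x : Int) > 0
      · rw [if_pos (by omega : (seen.count x : Int) + 1 > 1), if_pos h]
        norm_num
      · rw [if_neg (by omega : ¬ ((seen.count x : Int) + 1 > 1)), if_neg h]
    rw [List.foldl_cons]
    have hcong := congrArg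
      (fun init => (List.foldl
        (fun (st : PySem.Dict String Int × List String) identifier =>
          let count := st.1.insert identifier (st.1.getD identifier 0 + 1)
          let c := count.getD identifier 0
          if c > 1 then (count, st.2 ++ [identifier ++ "_" ++ PySem.Int.toStr (c - 1)])
          else (count, st.2 ++ [identifier])) init xs).2) hstep
    refine hcong.trans ?_
    beta_reduce
    rw [ih (seen ++ [x])]
    simp [specParts]


/-- The value B writes for the occurrence of rank `k` of identifier `x`. -/
def render (x : String) (k : Int) : String :=
  if k == 0 then x else x ++ "_" ++ PySem.Int.toStr k

/-- B's inner scatter loop: write one group's occurrences into `out`. -/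
def scatOne (x : String) (out : List String) (ps : List Int) (s : Int) : List String :=
  (PySem.List.enumerate ps s).foldl
    (fun out q => PySem.List.pySetD out q.2 (render x q.1)) out

/-- B's outer scatter loop over the group entries. -/
def scatAll (E : List (String × List Int)) (out : List String) : List String :=
  E.foldl (fun out e => scatOne e.1 out e.2 0) out

lemma scatOne_cons (x : String) (out : List String) (p : Int) (ps : List Int) (s : Int) :
    scatOne x out (p :: ps) s
      = scatOne x (PySem.List.pySetD out p (render x s)) ps (s + 1) := by
  simp [scatOne, PySem.List.enumerate_cons]

lemma length_scatOne (ps : List Int) : ∀ (s : Int) (x : String) (out : List String),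
    (scatOne x out ps s).length = out.length := by
  induction ps with
  | nil => intro s x out; simp [scatOne, PySem.List.enumerate_nil]
  | cons p ps ih =>
    intro s x out
    rw [scatOne_cons, ih (s + 1)]
    exact PySem.List.length_pySetD _ _ _

lemma scatOne_miss (ps : List Int) : ∀ (s : Int) (x : String) (out : List String) (j : Nat),
    (∀ i ∈ ps, 0 ≤ i) → ((j : Int) ∉ ps) → (scatOne x out ps s)[j]? = out[j]? := by
  induction ps with
  | nil => intro s x out j _ _; simp [scatOne, PySem.List.enumerate_nil]
  | cons p ps ih =>
    intro s x out j hpos hj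
    have hp : 0 ≤ p := hpos p (by simp)
    have hne : p.toNat ≠ j := by
      intro h
      apply hj
      have hpj : p = (j : Int) := by omega
      exact List.mem_cons.mpr (Or.inl hpj.symm)
    rw [scatOne_cons, ih (s + 1) x _ j (fun i hi => hpos i (by simp [hi]))
      (fun h => hj (by simp [h]))]
    rw [PySem.List.pySetD_of_nonneg _ _ hp, List.getElem?_set_ne hne]

lemma scatOne_hit (ps : List Int) : ∀ (s : Int) (x : String) (out : List String) (j k : Nat)
    (_ : ps.Pairwise (· < ·)) (_ : ∀ i ∈ ps, 0 ≤ i) (hk : k < ps.length)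
    (_ : ps[k] = (j : Int)) (_ : j < out.length),
    (scatOne x out ps s)[j]? = some (render x (s + k)) := by
  induction ps with
  | nil => intro s x out j k _ _ hk; simp at hk
  | cons p ps ih =>
    intro s x out j k hnd hpos hk hjk hj
    have hp : 0 ≤ p := hpos p (by simp)
    rw [scatOne_cons]
    match k, hk, hjk with
    | 0, hk, hjk =>
      have hpj : p = (j : Int) := by simpa using hjk
      have hnin : (j : Int) ∉ ps := by
        intro hmem
        have := (List.pairwise_cons.mp hnd).1 _ hmem
        omega
      rw [scatOne_miss ps (s + 1) x _ j (fun i hi => hpos i (by simp [hi])) hnin]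
      rw [PySem.List.pySetD_of_nonneg _ _ hp]
      have hpt : p.toNat = j := by omega
      simp [hpt, hj]
    | k + 1, hk, hjk =>
      have hklt : k < ps.length := by simpa using hk
      have hjk' : ps[k]'hklt = (j : Int) := by simpa using hjk
      have := ih (s + 1) x (PySem.List.pySetD out p (render x s)) j k
        (List.pairwise_cons.mp hnd).2 (fun i hi => hpos i (by simp [hi]))
        hklt hjk'
        (by rw [PySem.List.length_pySetD]; exact hj)
      rw [this]
      congr 2
      omega

lemma posAux_nonneg (l : List String) (s : Int) (x : String) (i : Int)
    (hs : 0 ≤ s) (h : i ∈ posAux s l x) : 0 ≤ i := by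
  simp only [posAux, List.mem_map, List.mem_filter] at h
  obtain ⟨p, ⟨hp, _⟩, rfl⟩ := h
  obtain ⟨k, hk, rfl⟩ := (PySem.List.mem_enumerate_iff l s p).mp hp
  simp; omega

lemma posAux_pairwise (l : List String) (s : Int) (x : String) :
    (posAux s l x).Pairwise (· < ·) := by
  unfold posAux
  exact List.pairwise_map.mpr
    (List.Pairwise.sublist List.filter_sublist (PySem.List.pairwise_lt_enumerate l s))

lemma posAux_mem (l : List String) (s : Int) (x : String) (i : Int) (h : i ∈ posAux s l x) :
    ∃ k, ∃ _ : k < l.length, i = s + k ∧ l[k] = x := by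
  simp only [posAux, List.mem_map, List.mem_filter] at h
  obtain ⟨p, ⟨hp, heq⟩, rfl⟩ := h
  obtain ⟨k, hk, rfl⟩ := (PySem.List.mem_enumerate_iff l s p).mp hp
  exact ⟨k, hk, rfl, by simpa using heq⟩

lemma posAux_cons_self (s : Int) (a : String) (l : List String) (x : String)
    (h : (a == x) = true) : posAux s (a :: l) x = s :: posAux (s + 1) l x := by
  simp [posAux, PySem.List.enumerate_cons, h]

lemma posAux_cons_ne (s : Int) (a : String) (l : List String) (x : String)
    (h : (a == x) = false) : posAux s (a :: l) x = posAux (s + 1) l x := by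
  simp [posAux, PySem.List.enumerate_cons, h]

lemma posAux_rank (l : List String) : ∀ (s : Int) (x : String) (j : Nat)
    (hj : j < l.length), l[j] = x →
    ((l.take j).count x < (posAux s l x).length) ∧
      (posAux s l x)[(l.take j).count x]? = some (s + j) := by
  induction l with
  | nil => intro s x j hj; simp at hj
  | cons a l ih =>
    intro s x j hj hx
    match j, hj, hx with
    | 0, hj, hx =>
      have hax : (a == x) = true := by simpa using hx
      rw [posAux_cons_self s a l x hax]
      refine ⟨by simp, by simp⟩
    | j + 1, hj, hx =>
      have hj' : j < l.length := by simpa using hj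
      have hx' : l[j] = x := by simpa using hx
      obtain ⟨hk, hval⟩ := ih (s + 1) x j hj' hx'
      by_cases hax : a = x
      · have hax'' : (a == x) = true := by simp [hax]
        have hcount : ((a :: l).take (j + 1)).count x = (l.take j).count x + 1 := by
          simp [List.take_succ_cons, hax]
        rw [posAux_cons_self s a l x hax'', hcount]
        refine ⟨by simp; omega, ?_⟩
        rw [List.getElem?_cons_succ, hval]
        congr 1
        push_cast; ring
      · have hax' : (a == x) = false := by simp [hax]
        have hcount : ((a :: l).take (j + 1)).count x = (l.take j).count x := by
          simp [List.take_succ_cons, hax]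
        rw [posAux_cons_ne s a l x hax', hcount]
        refine ⟨hk, ?_⟩
        rw [hval]
        congr 1
        push_cast; ring

lemma specParts_length (l : List String) : ∀ (seen : List String),
    (specParts seen l).length = l.length := by
  induction l with
  | nil => intro seen; simp [specParts]
  | cons x l ih => intro seen; simp [specParts, ih]

lemma specParts_getElem (l : List String) : ∀ (seen : List String) (j : Nat)
    (hj : j < l.length) (hj' : j < (specParts seen l).length),
    (specParts seen l)[j] = mkId (((seen ++ l.take j).count l[j] : Nat) : Int) l[j] := by
  induction l with
  | nil => intro seen j hj; simp at hj
  | cons a l ih =>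
    intro seen j hj hj'
    match j, hj with
    | 0, hj => simp [specParts]
    | j + 1, hj =>
      have hj'' : j < (specParts (seen ++ [a]) l).length := by
        simpa [specParts] using hj'
      have := ih (seen ++ [a]) j (by simpa using hj) hj''
      simpa [specParts, List.take_succ_cons, List.append_assoc] using this

lemma render_eq_mkId (k : Nat) (x : String) : render x (k : Int) = mkId (k : Int) x := by
  unfold render mkId
  match k with
  | 0 => simp
  | k + 1 =>
    rw [if_neg (by simp only [beq_iff_eq]; omega), if_pos (by positivity)]

lemma scat_keys_miss (ids : List String) (S : List String) : ∀ (out : List String) (j : Nat),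
    (∀ x ∈ S, (j : Int) ∉ posAux 0 ids x) →
    (S.foldl (fun out x => scatOne x out (posAux 0 ids x) 0) out)[j]? = out[j]? := by
  induction S with
  | nil => intro out j _; simp
  | cons y S ih =>
    intro out j h
    simp only [List.foldl_cons]
    rw [ih _ j (fun x hx => h x (by simp [hx]))]
    exact scatOne_miss _ 0 y out j
      (fun i hi => posAux_nonneg ids 0 y i le_rfl hi) (h y (by simp))

lemma scat_keys_length (ids : List String) (S : List String) : ∀ (out : List String),
    (S.foldl (fun out x => scatOne x out (posAux 0 ids x) 0) out).length = out.length := by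
  induction S with
  | nil => intro out; simp
  | cons y S ih =>
    intro out
    simp only [List.foldl_cons]
    rw [ih, length_scatOne]

lemma not_mem_posAux_of_ne (ids : List String) (x : String) (j : Nat)
    (hj : j < ids.length) (hne : ids[j] ≠ x) : (j : Int) ∉ posAux 0 ids x := by
  intro hmem
  obtain ⟨k, hk, hik, hkx⟩ := posAux_mem ids 0 x _ hmem
  have hkj : k = j := by omega
  subst hkj
  exact hne hkx

lemma scat_keys_hit (ids : List String) (S : List String) : ∀ (out : List String) (j : Nat)
    (_ : S.Nodup) (hj : j < ids.length) (_ : j < out.length) (_ : ids[j] ∈ S),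
    (S.foldl (fun out x => scatOne x out (posAux 0 ids x) 0) out)[j]?
      = some (render ids[j] (((ids.take j).count ids[j] : Nat) : Int)) := by
  induction S with
  | nil => intro out j _ _ _ hmem; simp at hmem
  | cons y S ih =>
    intro out j hnd hj hout hmem
    simp only [List.foldl_cons]
    by_cases hy : ids[j] = y
    · obtain ⟨hk, hval⟩ := posAux_rank ids 0 y j hj hy
      obtain ⟨_, hval'⟩ := List.getElem?_eq_some_iff.mp hval
      have hhit := scatOne_hit (posAux 0 ids y) 0 y out j ((ids.take j).count y)
        (posAux_pairwise ids 0 y) (fun i hi => posAux_nonneg ids 0 y i le_rfl hi)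
        hk (by rw [hval']; ring) hout
      have hnin : ∀ x ∈ S, (j : Int) ∉ posAux 0 ids x := by
        intro x hx
        have hxy : x ≠ y := by
          rintro rfl; exact (List.pairwise_cons.mp hnd).1 x hx rfl
        exact not_mem_posAux_of_ne ids x j hj (by rw [hy]; exact fun h => hxy h.symm)
      rw [scat_keys_miss ids S _ j hnin, hhit, hy]
      norm_num
    · have hmem' : ids[j] ∈ S := by
        rcases List.mem_cons.mp hmem with h | h
        · exact absurd h hy
        · exact h
      exact ih _ j (List.pairwise_cons.mp hnd).2 hj
        (by rw [length_scatOne]; exact hout) hmem'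

lemma groups_items (l : List String) :
    ((PySem.List.enumerate l).foldl
      (fun (g : PySem.Dict String (List Int)) p => g.modify p.2 [] (· ++ [p.1]))
      PySem.Dict.empty).items
    = (PySem.Set.ofList l).map (fun x => (x, posAux 0 l x)) := by
  have hkeys : ((PySem.List.enumerate l).foldl
      (fun (g : PySem.Dict String (List Int)) p => g.modify p.2 [] (· ++ [p.1]))
      PySem.Dict.empty).keys = PySem.Set.ofList l := by
    have h := PySem.Dict.keys_foldl_modify_key (PySem.List.enumerate l)
      (fun p => p.2) ([] : List Int) (fun _ p => (fun v => v ++ [p.1]))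
      (PySem.Dict.empty)
    rw [PySem.Dict.keys_empty, PySem.Set.update_nil_left,
      PySem.List.map_snd_enumerate] at h
    exact h
  have hnd : ((PySem.List.enumerate l).foldl
      (fun (g : PySem.Dict String (List Int)) p => g.modify p.2 [] (· ++ [p.1]))
      PySem.Dict.empty).keys.Nodup :=
    PySem.Dict.nodup_keys_foldl_modify_key (PySem.List.enumerate l)
      (fun p => p.2) ([] : List Int) (fun _ p => (fun v => v ++ [p.1]))
      PySem.Dict.empty (by rw [PySem.Dict.keys_empty]; exact List.nodup_nil)
  have hgetD : ∀ c, ((PySem.List.enumerate l).foldl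
      (fun (g : PySem.Dict String (List Int)) p => g.modify p.2 [] (· ++ [p.1]))
      PySem.Dict.empty).getD c [] = posAux 0 l c := by
    intro c
    have h := PySem.Dict.getD_foldl_modify_append
      ((PySem.List.enumerate l).map (fun p => (p.2, p.1))) PySem.Dict.empty c
    rw [List.foldl_map] at h
    rw [h, PySem.Dict.getD_empty, List.filter_map, List.map_map, List.nil_append]
    rfl
  rw [PySem.Dict.items_eq_map_keys _ hnd ([] : List Int), hkeys]
  exact List.map_congr_left (fun x _ => by rw [hgetD x])

lemma B_out (l : List String) :
    scatAll ((PySem.Set.ofList l).map (fun x => (x, posAux 0 l x)))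
      (List.replicate l.length "") = specParts [] l := by
  unfold scatAll
  rw [List.foldl_map]
  apply List.ext_getElem?
  intro j
  by_cases hj : j < l.length
  · rw [scat_keys_hit l (PySem.Set.ofList l) _ j (PySem.Set.nodup_ofList l) hj
      (by simp [hj]) ((PySem.Set.mem_ofList l _).mpr (l.getElem_mem hj))]
    rw [render_eq_mkId]
    have hlen : j < (specParts [] l).length := by rw [specParts_length]; exact hj
    rw [List.getElem?_eq_getElem hlen, specParts_getElem l [] j hj hlen]
    simp
  · rw [List.getElem?_eq_none (by rw [scat_keys_length]; simp; omega),
      List.getElem?_eq_none (by rw [specParts_length]; omega)]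

-- ===== VERDICT (by name: the statement is the Claim_ definition above) =====
theorem correct_identifiers_spec : Claim_equal_correct_identifiers := by
  intro s _
  unfold Spec_correct_identifiers correct_identifiers correct_identifiers_alt
  have hA := A_loop (PySem.Str.split₀ (PySem.Str.lower s)) [] []
  simp only [PySem.Dict.counter, List.foldl_nil] at hA
  have hB : (((PySem.List.enumerate (PySem.Str.split₀ (PySem.Str.lower s))).foldl
      (fun (g : PySem.Dict String (List Int)) p => g.modify p.2 [] (· ++ [p.1]))
      PySem.Dict.empty).items.foldl
        (fun out e =>
          (PySem.List.enumerate e.2).foldl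
            (fun out q =>
              PySem.List.pySetD out q.2
                (if q.1 == 0 then e.1 else e.1 ++ "_" ++ PySem.Int.toStr q.1))
            out)
        (List.replicate (PySem.Str.split₀ (PySem.Str.lower s)).length ""))
      = specParts [] (PySem.Str.split₀ (PySem.Str.lower s)) := by
    rw [groups_items]
    exact B_out _
  simp only [hA, hB, List.nil_append]
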